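-- pv_equiv track=rewrite | github.com/ahilananantha/Advent-of-Code-2021 | day3.py | find_most_common_bits
-- ===== SOURCE A (Python) =====
-- def find_most_common_bits(input):
--     num_bits = len(input[0])
--     total_nums = len(input)
--     ones_freqs = [0] * num_bits
--     for bit_str in input:
--         for bit_num, bit_val in enumerate(bit_str):
--             if bit_val == "1":
--                 ones_freqs[bit_num] += 1
--     most_common = []
--     for bit_num, ones_freq in enumerate(ones_freqs):
--         if ones_freq >= (total_nums - ones_freq):
--             # most common bit val is one at pos bit_num
--             # or equally common
--             most_common.append(1)
--         else:
--             # most common bit val is zero at pos bit_num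
--             most_common.append(0)
--     return most_common
-- ===== SOURCE B (Python) =====
-- def find_most_common_bits(input):
--     num_bits = len(input[0])
--     total = len(input)
--     return [1 if 2 * sum(1 for row in input if i < len(row) and row[i] == "1") >= total else 0
--             for i in range(num_bits)]
-- ===== Notes on version B (the rewrite author's own statement) =====
-- stated objective: simpler
-- what changed: Column-major one-liner: for each bit position i it counts the ones in that column directly and compares 2*ones against the total, replacing A's row-major frequency-array accumulation followed by a second reduction pass.
import Mathlib
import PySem

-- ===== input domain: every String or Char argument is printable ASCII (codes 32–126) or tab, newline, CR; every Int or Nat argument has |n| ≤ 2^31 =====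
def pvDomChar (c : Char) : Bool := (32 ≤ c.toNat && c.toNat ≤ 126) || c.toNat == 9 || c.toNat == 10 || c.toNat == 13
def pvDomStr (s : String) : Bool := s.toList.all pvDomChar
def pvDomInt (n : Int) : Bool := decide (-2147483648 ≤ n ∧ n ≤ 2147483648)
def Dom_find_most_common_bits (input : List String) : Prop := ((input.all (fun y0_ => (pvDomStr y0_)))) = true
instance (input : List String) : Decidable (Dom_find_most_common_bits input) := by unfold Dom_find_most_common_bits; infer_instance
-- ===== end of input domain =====

-- B replaces A's row-major frequency-array pass + reduction pass by a single column-major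
-- comprehension (count ones per column, compare 2*ones with the total); return values agree
-- everywhere A returns normally (objective: simpler).

-- ===== PORT A =====
-- inner loop `for bit_num, bit_val in enumerate(bit_str): if bit_val == "1": ones_freqs[bit_num] += 1`,
-- carrying the running index k; the out-of-range update (IndexError in Python) is excluded by Pre_,
-- so List.set's out-of-range no-op is never reached on admitted inputs.
def pvStepRow (fr : List Int) (k : Nat) : List Char → List Int
  | [] => fr
  | c :: cs => pvStepRow (if c = '1' then fr.set k (fr.getD k 0 + 1) else fr) (k + 1) cs

def find_most_common_bits (input : List String) : List Int :=
  -- `len(input[0])`: IndexError on empty input is excluded by Pre_, so headI is exact here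
  let num_bits := input.headI.toList.length
  let total_nums : Int := input.length
  let ones_freqs := input.foldl (fun fr s => pvStepRow fr 0 s.toList) (List.replicate num_bits (0 : Int))
  ones_freqs.foldl (fun acc f => acc ++ [if f ≥ total_nums - f then (1 : Int) else 0]) []

-- ===== PORT B =====
-- `sum(1 for row in input if i < len(row) and row[i] == "1")`; the guarded row[i] is row.toList[i]?
def pvColOnes (input : List String) (i : Nat) : Int :=
  input.foldl (fun c row => c + (if row.toList[i]? = some '1' then 1 else 0)) 0

def find_most_common_bits_alt (input : List String) : List Int :=
  let num_bits := input.headI.toList.length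
  let total : Int := input.length
  (List.range num_bits).map (fun i => if 2 * pvColOnes input i ≥ total then (1 : Int) else 0)

-- ===== PRECONDITION & SPEC =====
-- Pre_ admits exactly the inputs on which Python A returns: input nonempty (else len(input[0])
-- raises IndexError) and no row has a '1' at an index ≥ len(input[0]) (else ones_freqs[bit_num]
-- raises IndexError).
def Pre_find_most_common_bits (input : List String) : Prop :=
  input ≠ [] ∧ ∀ s ∈ input, '1' ∉ s.toList.drop input.headI.toList.length
instance (input : List String) : Decidable (Pre_find_most_common_bits input) := by
  unfold Pre_find_most_common_bits; infer_instance
def pvWitness_find_most_common_bits : List String := ["01", "10", "11"]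

def Spec_find_most_common_bits (input : List String) (out : List Int) : Prop := out = find_most_common_bits_alt input
instance (input : List String) (out : List Int) : Decidable (Spec_find_most_common_bits input out) := by unfold Spec_find_most_common_bits; infer_instance

-- ===== CLAIM (what is proved, stated in full; the proofs are below) =====
def Claim_equal_find_most_common_bits : Prop := ∀ (input : List String), Dom_find_most_common_bits input → Pre_find_most_common_bits input → Spec_find_most_common_bits input (find_most_common_bits input)

-- ===== LEMMAS AND PROOFS =====

lemma pvStepRow_length (cs : List Char) : ∀ (k : Nat) (fr : List Int),
    (pvStepRow fr k cs).length = fr.length := by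
  induction cs with
  | nil => intro k fr; rfl
  | cons c cs ih =>
      intro k fr
      simp only [pvStepRow, ih]
      split <;> simp

lemma pvStepRow_getD (cs : List Char) : ∀ (k : Nat) (fr : List Int) (i : Nat),
    (∀ j, cs[j]? = some '1' → k + j < fr.length) →
    (pvStepRow fr k cs).getD i 0 =
      fr.getD i 0 + (if k ≤ i ∧ cs[i - k]? = some '1' then 1 else 0) := by
  induction cs with
  | nil => intro k fr i _; simp [pvStepRow]
  | cons c cs ih =>
      intro k fr i h
      simp only [pvStepRow]
      have hlen : (if c = '1' then fr.set k (fr.getD k 0 + 1) else fr).length = fr.length := by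
        split <;> simp
      have h' : ∀ j, cs[j]? = some '1' →
          (k + 1) + j < (if c = '1' then fr.set k (fr.getD k 0 + 1) else fr).length := by
        intro j hj
        rw [hlen]
        have := h (j + 1) (by simpa using hj)
        omega
      rw [ih (k + 1) _ i h']
      by_cases hc : c = '1'
      · rw [if_pos hc]
        by_cases hik : i = k
        · subst hik
          have hk : i < fr.length := by have := h 0 (by simp [hc]); omega
          have h1 : ¬ (i + 1 ≤ i) := by omega
          simp [List.getD_eq_getElem?_getD, List.getElem?_set_self hk, h1, hc]
        · have hset : (fr.set k (fr.getD k 0 + 1)).getD i 0 = fr.getD i 0 := by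
            simp [List.getD_eq_getElem?_getD, List.getElem?_set_ne (show k ≠ i by omega)]
          rw [hset]
          by_cases hki : k ≤ i
          · have h1 : k + 1 ≤ i := by omega
            have h2 : i - k = (i - (k + 1)) + 1 := by omega
            simp [h1, hki, h2]
          · have h1 : ¬ (k + 1 ≤ i) := by omega
            simp [h1, hki]
      · simp only [if_neg hc]
        by_cases hik : i = k
        · subst hik
          have h1 : ¬ (i + 1 ≤ i) := by omega
          simp [h1, hc]
        · by_cases hki : k ≤ i
          · have h1 : k + 1 ≤ i := by omega
            have h2 : i - k = (i - (k + 1)) + 1 := by omega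
            simp [h1, hki, h2]
          · have h1 : ¬ (k + 1 ≤ i) := by omega
            simp [h1, hki]

lemma pvFoldl_add_shift {α : Type} (f : α → Int) (l : List α) : ∀ (a : Int),
    l.foldl (fun c x => c + f x) a = a + l.foldl (fun c x => c + f x) 0 := by
  induction l with
  | nil => intro a; simp
  | cons x l ih => intro a; simp only [List.foldl_cons]; rw [ih, ih (0 + f x)]; ring

lemma pvFoldRows (rows : List String) : ∀ (fr : List Int),
    (∀ s ∈ rows, '1' ∉ s.toList.drop fr.length) → ∀ i,
    (rows.foldl (fun f s => pvStepRow f 0 s.toList) fr).getD i 0 =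
      fr.getD i 0 + pvColOnes rows i := by
  induction rows with
  | nil => intro fr _ i; simp [pvColOnes]
  | cons s rows ih =>
      intro fr h i
      simp only [List.foldl_cons]
      have hs : ∀ j, s.toList[j]? = some '1' → 0 + j < fr.length := by
        intro j hj
        by_contra hge
        exact h s (by simp) (by
          refine List.mem_of_getElem? (l := s.toList.drop fr.length) (i := j - fr.length) ?_
          rw [List.getElem?_drop]
          have : fr.length + (j - fr.length) = j := by omega
          rw [this]; exact hj)
      have hlen : (pvStepRow fr 0 s.toList).length = fr.length := pvStepRow_length _ _ _
      have h' : ∀ t ∈ rows, '1' ∉ t.toList.drop (pvStepRow fr 0 s.toList).length := by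
        intro t ht; rw [hlen]; exact h t (by simp [ht])
      rw [ih _ h' i, pvStepRow_getD s.toList 0 fr i hs]
      simp only [Nat.zero_le, true_and, Nat.sub_zero]
      have hsplit : pvColOnes (s :: rows) i =
          (if s.toList[i]? = some '1' then (1 : Int) else 0) + pvColOnes rows i := by
        unfold pvColOnes
        simp only [List.foldl_cons, Int.zero_add]
        exact pvFoldl_add_shift (fun row => if row.toList[i]? = some '1' then (1 : Int) else 0)
          rows _
      rw [hsplit]
      ring

lemma pvFoldRows_length (rows : List String) : ∀ (fr : List Int),
    (rows.foldl (fun f s => pvStepRow f 0 s.toList) fr).length = fr.length := by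
  induction rows with
  | nil => intro fr; rfl
  | cons s rows ih => intro fr; simp only [List.foldl_cons, ih, pvStepRow_length]

lemma pvFoldl_append_map {α β : Type} (g : α → β) (l : List α) : ∀ (acc : List β),
    l.foldl (fun a x => a ++ [g x]) acc = acc ++ l.map g := by
  induction l with
  | nil => intro acc; simp
  | cons x l ih => intro acc; simp [ih]

-- ===== VERDICT (by name: the statement is the Claim_ definition above) =====
theorem find_most_common_bits_spec : Claim_equal_find_most_common_bits := by
  intro input _ hpre
  unfold Spec_find_most_common_bits find_most_common_bits find_most_common_bits_alt
  simp only []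
  set n := input.headI.toList.length with hn
  set total : Int := (input.length : Int)
  set ones_freqs := input.foldl (fun fr s => pvStepRow fr 0 s.toList) (List.replicate n (0 : Int))
    with hfreqs
  have hlen : ones_freqs.length = n := by
    rw [hfreqs, pvFoldRows_length]; simp
  have hget : ∀ i, ones_freqs.getD i 0 = pvColOnes input i := by
    intro i
    rw [hfreqs, pvFoldRows input _ (by simpa using hpre.2) i]
    simp [List.getD_eq_getElem?_getD, List.getElem?_replicate]
    split <;> simp
  rw [pvFoldl_append_map]
  apply List.ext_getElem
  · simp [hlen]
  · intro i h1 h2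
    simp only [List.getElem_map, List.getElem_range, List.nil_append]
    have hi : i < ones_freqs.length := by simpa using h1
    have : ones_freqs[i] = pvColOnes input i := by
      rw [← hget i, List.getD_eq_getElem?_getD, List.getElem?_eq_getElem hi]; rfl
    rw [this]
    split_ifs <;> omega
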